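-- pv_equiv track=rewrite | github.com/posl/comment_recommendation | script/mod_gen/2_time/zh/277_B/9.py | check
-- ===== SOURCE A (Python) =====
-- def check(n, cards):
--     if n != len(cards):
--         return False
--     for i in range(n):
--         if len(cards[i]) != 2:
--             return False
--     for i in range(n):
--         if cards[i][0] not in ('H', 'D', 'C', 'S'):
--             return False
--         if cards[i][1] not in ('A', '2', '3', '4', '5', '6', '7', '8', '9', 'T', 'J','Q', 'K'):
--             return False
--     for i in range(n):
--         for j in range(i+1, n):
--             if cards[i] == cards[j]:
--                 return False
--     return True
-- ===== SOURCE B (Python) =====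
-- def check(n, cards):
--     if n != len(cards):
--         return False
--     deck = {s + r for s in 'HDCS' for r in 'A23456789TJQK'}
--     cs = set(cards)
--     return len(cs) == n and cs <= deck
-- ===== Notes on version B (the rewrite author's own statement) =====
-- stated objective: alternative
-- what changed: Instead of A's staged per-card loops (length pass, suit/rank pass, quadratic pairwise duplicate scan), B materialises the full 52-card valid deck as a set once and decides validity by two set operations: len(set(cards)) == n (no duplicates) and set(cards) <= deck (every card is a well-formed suit+rank pair).
import Mathlib
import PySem

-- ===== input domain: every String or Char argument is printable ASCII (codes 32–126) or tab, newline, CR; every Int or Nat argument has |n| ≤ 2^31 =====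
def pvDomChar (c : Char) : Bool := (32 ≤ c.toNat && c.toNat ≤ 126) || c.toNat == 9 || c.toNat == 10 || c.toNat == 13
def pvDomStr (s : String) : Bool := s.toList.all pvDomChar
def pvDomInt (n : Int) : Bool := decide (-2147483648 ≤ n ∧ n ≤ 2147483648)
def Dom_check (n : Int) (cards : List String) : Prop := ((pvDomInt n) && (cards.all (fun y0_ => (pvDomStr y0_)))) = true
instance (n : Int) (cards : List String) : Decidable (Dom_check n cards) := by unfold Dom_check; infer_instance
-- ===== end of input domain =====

-- B replaces A's staged loops (length pass, suit/rank pass, quadratic duplicate scan) by set algebra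
-- against the precomputed 52-card deck: len(set(cards)) == n and set(cards) <= deck (alternative decomposition).


-- ===== PORT A =====
-- first loop: for i in range(n): if len(cards[i]) != 2: return False
def aLenLoop : List String → Bool
  | [] => true
  | c :: r => if PySem.Str.len c ≠ 2 then false else aLenLoop r

-- second loop: suit/rank membership.  cards[i][0] / cards[i][1] are in range because this
-- loop only runs after aLenLoop passed (len == 2), so the 'none' (IndexError) arm is unreachable.
def aSuitLoop : List String → Bool
  | [] => true
  | c :: r =>
    if !((PySem.Str.pyGet? c 0).any (fun ch => ch ∈ (['H','D','C','S'] : List Char))) then false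
    else if !((PySem.Str.pyGet? c 1).any (fun ch => ch ∈ (['A','2','3','4','5','6','7','8','9','T','J','Q','K'] : List Char))) then false
    else aSuitLoop r

-- third loop: for i: for j in range(i+1, n): if cards[i] == cards[j]: return False
def aDupLoop : List String → Bool
  | [] => true
  | c :: r => if r.contains c then false else aDupLoop r

def check (n : Int) (cards : List String) : Bool :=
  if n ≠ (cards.length : Int) then false
  else aLenLoop cards && aSuitLoop cards && aDupLoop cards

-- ===== PORT B =====
-- {s + r for s in 'HDCS' for r in 'A23456789TJQK'}: iterating a Python string yields its characters,
-- and s + r is the two-character string — String.ofList [s, r] is exact there.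
def deck : PySem.Set String :=
  PySem.Set.ofList (("HDCS".toList).flatMap
    (fun s => ("A23456789TJQK".toList).map (fun r => String.ofList [s, r])))

def check_alt (n : Int) (cards : List String) : Bool :=
  if n ≠ (cards.length : Int) then false
  else
    let cs := PySem.Set.ofList cards
    decide (PySem.Set.len cs = n) && PySem.Set.issubset cs deck

-- ===== PRECONDITION & SPEC =====
def Spec_check (n : Int) (cards : List String) (out : Bool) : Prop := out = check_alt n cards
instance (n : Int) (cards : List String) (out : Bool) : Decidable (Spec_check n cards out) := by unfold Spec_check; infer_instance

-- ===== CLAIM =====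
def Claim_equal_check : Prop := ∀ (n : Int) (cards : List String), Dom_check n cards → Spec_check n cards (check n cards)

-- ===== LEMMAS AND PROOFS =====
-- a string is in the deck iff it passes A's per-card length/suit/rank tests
theorem mem_deck_iff (c : String) :
    c ∈ deck ↔ ¬ PySem.Str.len c ≠ 2 ∧
      ((PySem.Str.pyGet? c 0).any (fun ch => ch ∈ (['H','D','C','S'] : List Char))) = true ∧
      ((PySem.Str.pyGet? c 1).any (fun ch => ch ∈ (['A','2','3','4','5','6','7','8','9','T','J','Q','K'] : List Char))) = true := by
  simp only [deck, PySem.Set.mem_ofList, List.mem_flatMap, List.mem_map, PySem.Str.len,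
    PySem.Str.pyGet?, not_not]
  rcases h : c.toList with _ | ⟨a, t⟩
  · simp [h, PySem.Chars.pyGet?, String.ofList_eq]
  · rcases t with _ | ⟨b, u⟩
    · simp [h, PySem.Chars.pyGet?, String.ofList_eq]
    · rcases u with _ | ⟨d, v⟩
      · simp only [h, PySem.Chars.pyGet?, String.ofList_eq, PySem.List.pyGet?]
        norm_num [PySem.List.pyIdx?]
        rw [show "HDCS".toList = (['H','D','C','S'] : List Char) from by decide,
          show "A23456789TJQK".toList = (['A','2','3','4','5','6','7','8','9','T','J','Q','K'] : List Char) from by decide]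
        simp
      · simp [h, PySem.Chars.pyGet?, String.ofList_eq]
        omega

-- A's first two passes fused: they succeed together iff every card is in the deck
theorem lenSuit_iff (l : List String) :
    (aLenLoop l && aSuitLoop l) = true ↔ ∀ c ∈ l, c ∈ deck := by
  induction l with
  | nil => simp [aLenLoop, aSuitLoop]
  | cons c r ih =>
    rw [aLenLoop, aSuitLoop]
    by_cases h1 : PySem.Str.len c ≠ 2
    · rw [if_pos h1]
      exact iff_of_false (by simp)
        (fun hall => ((mem_deck_iff c).mp (hall c List.mem_cons_self)).1 h1)
    · rw [if_neg h1]
      by_cases h2 : (!((PySem.Str.pyGet? c 0).any fun ch => ch ∈ (['H','D','C','S'] : List Char))) = true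
      · rw [if_pos h2]
        refine iff_of_false (by simp) (fun hall => ?_)
        have := ((mem_deck_iff c).mp (hall c List.mem_cons_self)).2.1
        rw [this] at h2
        simp at h2
      · rw [if_neg h2]
        by_cases h3 : (!((PySem.Str.pyGet? c 1).any fun ch => ch ∈ (['A','2','3','4','5','6','7','8','9','T','J','Q','K'] : List Char))) = true
        · rw [if_pos h3]
          refine iff_of_false (by simp) (fun hall => ?_)
          have := ((mem_deck_iff c).mp (hall c List.mem_cons_self)).2.2
          rw [this] at h3
          simp at h3
        · rw [if_neg h3]
          simp only [Bool.not_eq_true', Bool.not_eq_false] at h2 h3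
          simp only [ih, List.forall_mem_cons, iff_and_self]
          intro _
          exact (mem_deck_iff c).mpr ⟨h1, h2, h3⟩

-- A's pairwise scan is exactly Nodup
theorem dupLoop_iff (l : List String) : aDupLoop l = true ↔ l.Nodup := by
  induction l with
  | nil => simp [aDupLoop]
  | cons c r ih =>
    rw [aDupLoop, List.nodup_cons]
    by_cases h : r.contains c = true
    · rw [if_pos h]
      exact iff_of_false (by simp)
        (fun hand => hand.1 (by simpa [List.contains_eq_mem] using h))
    · have h' : c ∉ r := by simpa [List.contains_eq_mem] using h
      rw [if_neg h]
      simp [ih, h']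

-- |set(l)| = |l| iff l has no duplicates
theorem len_ofList_iff (l : List String) :
    (PySem.Set.ofList l).length = l.length ↔ l.Nodup := by
  induction l with
  | nil => simp
  | cons x xs ih =>
    rw [PySem.Set.ofList_cons, List.length_cons, List.length_cons, List.nodup_cons]
    by_cases hx : x ∈ xs
    · have hx' : x ∈ PySem.Set.ofList xs := (PySem.Set.mem_ofList xs x).mpr hx
      have h1 : ((PySem.Set.ofList xs).filter (fun y => !(y == x))).length < (PySem.Set.ofList xs).length := by
        apply List.length_filter_lt_length_iff_exists.mpr
        exact ⟨x, hx', by simp⟩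
      have h2 := PySem.Set.length_ofList_le xs
      simp only [PySem.Set.discard]
      constructor
      · intro hlen; omega
      · rintro ⟨hxn, -⟩; exact absurd hx hxn
    · have hd : PySem.Set.discard (PySem.Set.ofList xs) x = PySem.Set.ofList xs := by
        simp only [PySem.Set.discard]
        apply List.filter_eq_self.mpr
        intro y hy
        have hyx : y ≠ x := fun e => hx (e ▸ (PySem.Set.mem_ofList xs y).mp hy)
        simp [hyx]
      rw [hd]
      simp [ih, hx]

theorem check_eq_alt (n : Int) (cards : List String) : check n cards = check_alt n cards := by
  unfold check check_alt
  by_cases h : n ≠ (cards.length : Int)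
  · simp [h]
  · rw [if_neg h, if_neg h]
    rw [not_ne_iff] at h
    subst h
    rw [Bool.eq_iff_iff]
    have hA : (aLenLoop cards && aSuitLoop cards && aDupLoop cards) = true ↔
        (∀ c ∈ cards, c ∈ deck) ∧ cards.Nodup := by
      rw [Bool.and_eq_true, lenSuit_iff, dupLoop_iff]
    rw [hA]
    show _ ↔ (decide (PySem.Set.len (PySem.Set.ofList cards) = (cards.length : Int)) &&
      PySem.Set.issubset (PySem.Set.ofList cards) deck) = true
    simp only [Bool.and_eq_true, decide_eq_true_eq, PySem.Set.issubset_iff, PySem.Set.len,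
      Int.natCast_inj, PySem.Set.mem_ofList, len_ofList_iff]
    tauto

-- ===== VERDICT =====
theorem check_spec : Claim_equal_check := by
  intro n cards _
  unfold Spec_check
  exact check_eq_alt n cards
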